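-- pv_equiv track=rewrite | github.com/josiahroa/cs-masters | 5414-greedy-algorithms/assignment_2/longest_stable_subsequence.py | memoizeLSS
-- ===== SOURCE A (Python) =====
-- def memoizeLSS(a):
--     T = {} # Initialize the memo table to empty dictionary
--     # Now populate the entries for the base case
--     n = len(a)
--     for j in range(-1, n):
--         T[(n, j)] = 0 # i = n and j
--     # Now fill out the table : figure out the two nested for loops
--     # It is important to also figure out the order in which you iterate the indices i and j
--     # Use the recurrence structure itself as a guide: see for instance that T[(i,j)] will depend on T[(i+1, j)]
--     # your code here
--
--     for i in range(n-1, -1, -1):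
--         for j in range(-1, i):
--             aj = a[j] if 0 <= j < len(a) else None
--
--             if aj != None and abs(a[i] - aj) > 1:
--                 T[(i,j)] = T[(i + 1, j)]
--             else:
--                 T[(i, j)] = max(T[(i + 1), i] + 1, T[(i + 1, j)])
--
--     return T
-- ===== SOURCE B (Python) =====
-- def memoizeLSS(a):
--     # Top-down: values are computed by a memoized recursion instead of A's
--     # bottom-up nested loops; the table is then presented in canonical
--     # (base row, then rows i = n-1 .. 0) order.
--     n = len(a)
--     memo = {}
--     get = memo.get
--
--     def lss(key):
--         v = get(key)
--         if v is not None: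
--             return v
--         i, j = key
--         if i == n:
--             v = 0
--         elif 0 <= j and abs(a[i] - a[j]) > 1:
--             v = lss((i + 1, j))
--         else:
--             v = max(lss((i + 1, i)) + 1, lss((i + 1, j)))
--         memo[key] = v
--         return v
--
--     keys = [(n, j) for j in range(-1, n)] + \
--            [(i, j) for i in range(n - 1, -1, -1) for j in range(-1, i)]
--     return {k: lss(k) for k in keys}
-- ===== Notes on version B (the rewrite author's own statement) =====
-- stated objective: alternative
-- what changed: A's bottom-up DP (nested reverse loops filling T cell by cell from already-filled cells) is replaced by a top-down memoized recursion lss(i,j) that computes each value on demand; the finished table is emitted in canonical key order.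
import Mathlib
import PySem

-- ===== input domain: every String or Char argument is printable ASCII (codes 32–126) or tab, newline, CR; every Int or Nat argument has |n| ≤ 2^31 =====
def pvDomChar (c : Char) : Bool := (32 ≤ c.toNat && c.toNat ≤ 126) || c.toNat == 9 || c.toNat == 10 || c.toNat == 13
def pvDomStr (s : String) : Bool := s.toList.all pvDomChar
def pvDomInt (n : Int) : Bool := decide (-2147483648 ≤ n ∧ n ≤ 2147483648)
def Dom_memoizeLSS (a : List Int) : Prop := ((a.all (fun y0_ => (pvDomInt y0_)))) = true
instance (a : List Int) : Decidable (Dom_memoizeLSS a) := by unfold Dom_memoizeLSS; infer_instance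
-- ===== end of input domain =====

-- B replaces A's bottom-up nested-loop DP by a top-down memoized recursion lss(i,j),
-- emitting the finished table in canonical key order; objective: alternative.

-- ===== PORT A =====
-- inner loop body of A; a[i] and the T[(i+1,·)] lookups are always in range / present on the
-- indices the loops reach (proved below), so pyGetD/getD are exact here
def stepAinner (a : List Int) (i : Int) (T : PySem.Dict (Int × Int) Int) (j : Int) :
    PySem.Dict (Int × Int) Int :=
  let aj : Option Int := if 0 ≤ j ∧ j < (a.length : Int) then PySem.List.pyGet? a j else none
  match aj with
  | some w =>
    if 1 < |PySem.List.pyGetD a i 0 - w| then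
      T.insert (i, j) (T.getD (i + 1, j) 0)
    else
      T.insert (i, j) (max (T.getD (i + 1, i) 0 + 1) (T.getD (i + 1, j) 0))
  | none =>
    T.insert (i, j) (max (T.getD (i + 1, i) 0 + 1) (T.getD (i + 1, j) 0))

def stepAouter (a : List Int) (T : PySem.Dict (Int × Int) Int) (i : Int) :
    PySem.Dict (Int × Int) Int :=
  (PySem.List.pyRange (-1) i 1).foldl (stepAinner a i) T

def memoizeLSS (a : List Int) : List (Int × Int × Int) :=
  let n : Int := a.length
  let T0 : PySem.Dict (Int × Int) Int :=
    (PySem.List.pyRange (-1) n 1).foldl (fun T j => T.insert (n, j) 0) PySem.Dict.empty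
  let T := (PySem.List.pyRange (n - 1) (-1) (-1)).foldl (stepAouter a) T0
  T.items.map (fun p => (p.1.1, p.1.2, p.2))


-- ===== PORT B =====
-- lss(i, j) of Source B, the memo dict threaded through; fuel only makes the recursion total
-- (a.length + 1 is always enough for the calls the entry makes — proved below);
-- a[i] / a[j] are in range on every call made (0 ≤ j < i ≤ n), so pyGetD is exact
def lssB (a : List Int) :
    Nat → Int × Int → PySem.Dict (Int × Int) Int → Int × PySem.Dict (Int × Int) Int
  | 0, _, memo => (0, memo)
  | fuel + 1, key, memo =>
    match memo.get? key with
    | some v => (v, memo)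
    | none =>
      match key with
      | (i, j) =>
        let r :=
          if i = (a.length : Int) then ((0 : Int), memo)
          else if 0 ≤ j ∧ 1 < |PySem.List.pyGetD a i 0 - PySem.List.pyGetD a j 0| then
            lssB a fuel (i + 1, j) memo
          else
            let p1 := lssB a fuel (i + 1, i) memo
            let p2 := lssB a fuel (i + 1, j) p1.2
            (max (p1.1 + 1) p2.1, p2.2)
        (r.1, r.2.insert (i, j) r.1)

-- the key list of Source B: base row (n, j), then (i, j) for i = n-1 .. 0, j = -1 .. i-1
def keysB (a : List Int) : List (Int × Int) :=
  (PySem.List.pyRange (-1) (a.length : Int) 1).map (fun j => ((a.length : Int), j)) ++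
  (PySem.List.pyRange ((a.length : Int) - 1) (-1) (-1)).flatMap
    (fun i => (PySem.List.pyRange (-1) i 1).map (fun j => (i, j)))

def memoizeLSS_alt (a : List Int) : List (Int × Int × Int) :=
  let st := (keysB a).foldl
    (fun st k =>
      let r := lssB a (a.length + 1) k st.2
      (st.1.insert k r.1, r.2))
    ((PySem.Dict.empty : PySem.Dict (Int × Int) Int),
     (PySem.Dict.empty : PySem.Dict (Int × Int) Int))
  st.1.items.map (fun p => (p.1.1, p.1.2, p.2))


-- ===== PRECONDITION & SPEC =====
def Spec_memoizeLSS (a : List Int) (out : List (Int × Int × Int)) : Prop := out = memoizeLSS_alt a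
instance (a : List Int) (out : List (Int × Int × Int)) : Decidable (Spec_memoizeLSS a out) := by unfold Spec_memoizeLSS; infer_instance

-- ===== CLAIM (what is proved, stated in full; the proofs are below) =====
def Claim_equal_memoizeLSS : Prop := ∀ (a : List Int), Dom_memoizeLSS a → Spec_memoizeLSS a (memoizeLSS a)

-- ===== LEMMAS AND PROOFS =====

-- the value stored at (i, j), with the row-(i+1) lookups abstracted into G
def avG (a : List Int) (i : Int) (G : Int → Int) (j : Int) : Int :=
  if 0 ≤ j ∧ 1 < |PySem.List.pyGetD a i 0 - PySem.List.pyGetD a j 0| then G j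
  else max (G i + 1) (G j)

-- the table value at row i = a.length - g, as a pure function of the "gap" g = a.length - i
def W (a : List Int) : Nat → Int → Int
  | 0, _ => 0
  | g + 1, j => avG a ((a.length : Int) - (g : Int) - 1) (W a g) j

theorem stepAinner_eq (a : List Int) (i : Int) (G : Int → Int)
    (hin : i < (a.length : Int)) (T : PySem.Dict (Int × Int) Int) (j : Int)
    (hb : -1 ≤ j ∧ j < i)
    (hGj : T.getD (i + 1, j) 0 = G j) (hGi : T.getD (i + 1, i) 0 = G i) :
    stepAinner a i T j = T.insert (i, j) (avG a i G j) := by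
  by_cases h0 : 0 ≤ j
  · have hlt : j < (a.length : Int) := lt_trans hb.2 hin
    have hget : PySem.List.pyGet? a j = some (PySem.List.pyGetD a j 0) := by
      rw [PySem.List.pyGet?_eq_some_getElem a h0 hlt, PySem.List.pyGetD_eq_getElem a 0 h0 hlt]
    simp only [stepAinner, if_pos (And.intro h0 hlt), hget, avG, hGj, hGi]
    by_cases hc : 1 < |PySem.List.pyGetD a i 0 - PySem.List.pyGetD a j 0|
    · rw [if_pos hc, if_pos (And.intro h0 hc)]
    · rw [if_neg hc, if_neg (by tauto)]
  · have : ¬ (0 ≤ j ∧ j < (a.length : Int)) := by tauto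
    simp only [stepAinner, if_neg this, avG, hGj, hGi, if_neg (by tauto : ¬ (0 ≤ j ∧ 1 < |PySem.List.pyGetD a i 0 - PySem.List.pyGetD a j 0|))]

-- A's inner loop over fresh keys (i, ·) appends its items in order and keeps keys Nodup
theorem innerA (a : List Int) (i : Int) (G : Int → Int)
    (hin : i < (a.length : Int)) :
    ∀ (js : List Int) (T : PySem.Dict (Int × Int) Int),
      (∀ j ∈ js, -1 ≤ j ∧ j < i) →
      js.Nodup →
      T.keys.Nodup →
      (∀ j ∈ js, T.getD (i + 1, j) 0 = G j) →
      T.getD (i + 1, i) 0 = G i →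
      (∀ j ∈ js, T.contains (i, j) = false) →
      (js.foldl (stepAinner a i) T).items
          = T.items ++ js.map (fun j => ((i, j), avG a i G j))
        ∧ (js.foldl (stepAinner a i) T).keys.Nodup := by
  intro js
  induction js with
  | nil => intro T _ _ hnd _ _ _; simpa using hnd
  | cons j0 rest ih =>
    intro T hb hnd hk hGj hGi hfresh
    have hb0 := hb j0 (by simp)
    have hstep : stepAinner a i T j0 = T.insert (i, j0) (avG a i G j0) :=
      stepAinner_eq a i G hin T j0 hb0 (hGj j0 (by simp)) hGi
    have hfresh0 : T.contains (i, j0) = false := hfresh j0 (by simp)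
    set T' := T.insert (i, j0) (avG a i G j0) with hT'
    have hitems' : T'.items = T.items ++ [((i, j0), avG a i G j0)] :=
      PySem.Dict.items_insert_of_not_contains _ _ hfresh0
    have hne1 : ∀ j : Int, ((i + 1, j) : Int × Int) ≠ (i, j0) := by
      intro j h; have := congrArg Prod.fst h; simp at this
    have := ih T' (fun j hj => hb j (by simp [hj]))
      (List.Nodup.of_cons hnd)
      (PySem.Dict.nodup_keys_insert _ _ _ hk)
      (fun j hj => by
        rw [hT', PySem.Dict.getD_insert_of_ne _ _ _ (hne1 j)]
        exact hGj j (by simp [hj]))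
      (by rw [hT', PySem.Dict.getD_insert_of_ne _ _ _ (hne1 i)]; exact hGi)
      (fun j hj => by
        rw [hT', PySem.Dict.contains_insert]
        have hne : j ≠ j0 := by
          intro h; subst h; exact (List.nodup_cons.mp hnd).1 hj
        simp [hne, hfresh j (by simp [hj])])
    refine ⟨?_, ?_⟩
    · simp only [List.foldl_cons, hstep, this.1, hitems', List.map_cons]
      simp
    · simpa only [List.foldl_cons, hstep, ← hT'] using this.2

-- one finished row, in A's (and B's) key order, valued by W
def rowItems (a : List Int) (i : Int) : List ((Int × Int) × Int) :=
  (PySem.List.pyRange (-1) i 1).map (fun j => ((i, j), W a (a.length - i.toNat) j))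

-- A's countdown loop appends the rows m-1 .. 0
theorem outerA (a : List Int) :
    ∀ (m : Nat) (T : PySem.Dict (Int × Int) Int) (out : List ((Int × Int) × Int)),
      m ≤ a.length →
      T.keys.Nodup →
      (∀ p ∈ T.items, (m : Int) ≤ p.1.1) →
      (∀ j : Int, -1 ≤ j → j < (m : Int) →
        T.getD ((m : Int), j) 0 = W a (a.length - m) j) →
      T.items = out →
      ((PySem.List.pyRange ((m : Int) - 1) (-1) (-1)).foldl (stepAouter a) T).items
          = out ++ (PySem.List.pyRange ((m : Int) - 1) (-1) (-1)).flatMap (rowItems a)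
        ∧ ((PySem.List.pyRange ((m : Int) - 1) (-1) (-1)).foldl (stepAouter a) T).keys.Nodup := by
  intro m
  induction m with
  | zero =>
    intro T out _ hk _ _ hout
    rw [PySem.List.pyRange_neg_one_eq_nil (by norm_num)]
    exact ⟨by simpa using hout, hk⟩
  | succ m ih =>
    intro T out hm hk hge h2 hout
    have hcast : ((m + 1 : Nat) : Int) - 1 = (m : Int) := by push_cast; ring
    rw [hcast, PySem.List.pyRange_neg_one_cons (by omega : (-1:Int) < (m:Int))]
    simp only [List.foldl_cons, List.flatMap_cons]
    set G : Int → Int := fun j => W a (a.length - (m + 1)) j with hG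
    have hfresh : ∀ j ∈ PySem.List.pyRange (-1) (m:Int) 1, T.contains ((m:Int), j) = false := by
      intro j _
      by_contra h
      have hc : T.contains ((m:Int), j) = true := by
        cases hcc : T.contains ((m:Int), j) with
        | true => rfl
        | false => exact absurd hcc h
      have hmem := (PySem.Dict.contains_iff_mem_keys T _).mp hc
      simp only [PySem.Dict.keys, List.mem_map] at hmem
      obtain ⟨p, hp, hp1⟩ := hmem
      have := hge p hp
      rw [hp1] at this
      push_cast at this
      omega
    have h2' : ∀ j : Int, -1 ≤ j → j < (m:Int) + 1 → T.getD ((m:Int) + 1, j) 0 = G j := by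
      intro j hj1 hj2
      have := h2 j hj1 (by push_cast; omega)
      simpa [show ((m+1:Nat):Int) = (m:Int)+1 by push_cast; ring] using this
    have hinner := innerA a (m:Int) G (by exact_mod_cast hm)
      (PySem.List.pyRange (-1) (m:Int) 1) T
      (fun j hj => by
        have := PySem.List.mem_pyRange_one.mp hj; exact ⟨this.1, this.2⟩)
      (PySem.List.nodup_pyRange_one _ _)
      hk
      (fun j hj => by
        have hb := PySem.List.mem_pyRange_one.mp hj
        exact h2' j hb.1 (by omega))
      (h2' (m:Int) (by omega) (by omega))
      hfresh
    have hAstep : stepAouter a T (m:Int)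
        = (PySem.List.pyRange (-1) (m:Int) 1).foldl (stepAinner a (m:Int)) T := rfl
    set TA := (PySem.List.pyRange (-1) (m:Int) 1).foldl (stepAinner a (m:Int)) T with hTA
    -- the freshly written row is rowItems a m
    have hrow : (PySem.List.pyRange (-1) (m:Int) 1).map
        (fun j => (((m:Int), j), avG a (m:Int) G j)) = rowItems a (m:Int) := by
      have hWv : ∀ j : Int, avG a (m:Int) G j = W a (a.length - m) j := by
        intro j
        have hgap : a.length - m = (a.length - (m + 1)) + 1 := by omega
        rw [hgap]
        show avG a (m:Int) G j
            = avG a ((a.length : Int) - ((a.length - (m+1) : Nat) : Int) - 1)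
                (W a (a.length - (m+1))) j
        have hidx : ((a.length : Int) - ((a.length - (m+1) : Nat) : Int) - 1) = (m : Int) := by
          push_cast [Nat.cast_sub hm]; ring
        rw [hidx]
      simp only [rowItems, Int.toNat_natCast]
      exact List.map_congr_left (fun j _ => by rw [hWv j])
    have hAitems : TA.items = T.items ++ rowItems a (m:Int) := by rw [hinner.1, hrow]
    have hih := ih TA (out ++ rowItems a (m:Int)) (by omega) hinner.2
      (by
        intro p hp
        rw [hAitems] at hp
        rcases List.mem_append.mp hp with h | h
        · have := hge p h; push_cast at this ⊢; omega
        · simp only [rowItems, List.mem_map] at h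
          obtain ⟨j, _, hj⟩ := h
          rw [← hj])
      (by
        intro j hj1 hj2
        have hmem : (((m:Int), j), W a (a.length - m) j) ∈ TA.items := by
          rw [hAitems]
          refine List.mem_append.mpr (Or.inr ?_)
          simp only [rowItems, Int.toNat_natCast]
          exact List.mem_map.mpr ⟨j, PySem.List.mem_pyRange_one.mpr ⟨by omega, hj2⟩, rfl⟩
        exact PySem.Dict.getD_of_mem_items TA hmem hinner.2 0)
      (by rw [hAitems, hout])
    exact ⟨by rw [hAstep, hih.1, List.append_assoc], hih.2⟩

-- B side: the memo dict only ever holds correct table values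
def Coh (a : List Int) (memo : PySem.Dict (Int × Int) Int) : Prop :=
  ∀ p ∈ memo.items, ∃ i : Nat, i ≤ a.length ∧ p.1.1 = (i : Int) ∧ p.2 = W a (a.length - i) p.1.2

theorem coh_insert (a : List Int) (memo : PySem.Dict (Int × Int) Int)
    (hc : Coh a memo) (i : Nat) (hi : i ≤ a.length) (j : Int) :
    Coh a (memo.insert ((i : Int), j) (W a (a.length - i) j)) := by
  intro p hp
  rcases (PySem.Dict.mem_items_insert _ _ _ _).mp hp with h | h
  · exact ⟨i, hi, by rw [h], by rw [h]⟩
  · exact hc p h.1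

theorem lssB_spec (a : List Int) :
    ∀ (fuel : Nat) (i : Nat) (j : Int) (memo : PySem.Dict (Int × Int) Int),
      i ≤ a.length → a.length - i < fuel → Coh a memo →
      (lssB a fuel ((i : Int), j) memo).1 = W a (a.length - i) j
        ∧ Coh a (lssB a fuel ((i : Int), j) memo).2 := by
  intro fuel
  induction fuel with
  | zero => intro i j memo _ hf _; omega
  | succ fuel ih =>
    intro i j memo hi hf hc
    cases hget : memo.get? ((i:Int), j) with
    | some v =>
      have hstep : lssB a (fuel + 1) ((i:Int), j) memo = (v, memo) := by
        simp only [lssB, hget]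
      obtain ⟨i', hi', he, hv⟩ := hc _ (PySem.Dict.mem_items_of_get?_eq_some memo hget)
      have hii : i = i' := by
        have h' : (i : Int) = (i' : Int) := he
        exact_mod_cast h'
      subst hii
      rw [hstep]
      exact ⟨hv, hc⟩
    | none =>
      by_cases hn : i = a.length
      · subst hn
        have hstep : lssB a (fuel + 1) (((a.length : Nat) : Int), j) memo
            = (0, memo.insert (((a.length : Nat) : Int), j) 0) := by
          simp [lssB, hget]
        rw [hstep, Nat.sub_self]
        refine ⟨rfl, ?_⟩
        have := coh_insert a memo hc a.length (le_refl _) j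
        simpa [W, Nat.sub_self] using this
      · have hlt : i < a.length := by omega
        have hne : ¬ ((i:Int) = (a.length : Int)) := by exact_mod_cast hn
        have hcast1 : ((i:Int) + 1) = (((i + 1 : Nat)) : Int) := by push_cast; ring
        have hgap : a.length - i = (a.length - (i + 1)) + 1 := by omega
        have hidx : ((a.length : Int) - ((a.length - (i+1) : Nat) : Int) - 1) = (i : Int) := by
          push_cast [Nat.cast_sub (by omega : i + 1 ≤ a.length)]; ring
        have hW : ∀ x : Int, W a (a.length - i) x
            = avG a (i:Int) (W a (a.length - (i+1))) x := by
          intro x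
          rw [hgap]
          show avG a ((a.length : Int) - ((a.length - (i+1) : Nat) : Int) - 1)
              (W a (a.length - (i+1))) x = _
          rw [hidx]
        by_cases hcond : 0 ≤ j ∧ 1 < |PySem.List.pyGetD a (i:Int) 0 - PySem.List.pyGetD a j 0|
        · have hrec := ih (i+1) j memo (by omega) (by omega) hc
          rw [← hcast1] at hrec
          have hstep : lssB a (fuel + 1) ((i:Int), j) memo
              = ((lssB a fuel ((i:Int) + 1, j) memo).1,
                 (lssB a fuel ((i:Int) + 1, j) memo).2.insert ((i:Int), j)
                   (lssB a fuel ((i:Int) + 1, j) memo).1) := by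
            simp only [lssB, hget, if_neg hne, if_pos hcond]
          have hval : (lssB a fuel ((i:Int) + 1, j) memo).1 = W a (a.length - i) j := by
            rw [hrec.1, hW j, avG, if_pos hcond]
          rw [hstep]
          refine ⟨hval, ?_⟩
          have := coh_insert a (lssB a fuel ((i:Int) + 1, j) memo).2 hrec.2 i hi j
          rw [← hval] at this
          exact this
        · have hrec1 := ih (i+1) (i:Int) memo (by omega) (by omega) hc
          rw [← hcast1] at hrec1
          have hrec2 := ih (i+1) j (lssB a fuel ((i:Int) + 1, (i:Int)) memo).2
            (by omega) (by omega) hrec1.2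
          rw [← hcast1] at hrec2
          have hstep : lssB a (fuel + 1) ((i:Int), j) memo
              = (max ((lssB a fuel ((i:Int) + 1, (i:Int)) memo).1 + 1)
                     (lssB a fuel ((i:Int) + 1, j)
                        (lssB a fuel ((i:Int) + 1, (i:Int)) memo).2).1,
                 (lssB a fuel ((i:Int) + 1, j)
                    (lssB a fuel ((i:Int) + 1, (i:Int)) memo).2).2.insert ((i:Int), j)
                   (max ((lssB a fuel ((i:Int) + 1, (i:Int)) memo).1 + 1)
                        (lssB a fuel ((i:Int) + 1, j)
                           (lssB a fuel ((i:Int) + 1, (i:Int)) memo).2).1)) := by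
            simp only [lssB, hget, if_neg hne, if_neg hcond]
          have hval : max ((lssB a fuel ((i:Int) + 1, (i:Int)) memo).1 + 1)
              (lssB a fuel ((i:Int) + 1, j) (lssB a fuel ((i:Int) + 1, (i:Int)) memo).2).1
              = W a (a.length - i) j := by
            rw [hrec1.1, hrec2.1, hW j, avG, if_neg hcond]
          rw [hstep]
          refine ⟨hval, ?_⟩
          have := coh_insert a
            (lssB a fuel ((i:Int) + 1, j) (lssB a fuel ((i:Int) + 1, (i:Int)) memo).2).2
            hrec2.2 i hi j
          rw [← hval] at this
          exact this

-- the entry fold of B: outputs accumulate one correct item per key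
theorem foldB (a : List Int) :
    ∀ (ks : List (Int × Int)) (memo out : PySem.Dict (Int × Int) Int),
      Coh a memo →
      (∀ k ∈ ks, ∃ i : Nat, i ≤ a.length ∧ k.1 = (i : Int)) →
      (∀ k ∈ ks, out.contains k = false) →
      ks.Nodup →
      (ks.foldl
        (fun st k =>
          let r := lssB a (a.length + 1) k st.2
          (st.1.insert k r.1, r.2)) (out, memo)).1.items
        = out.items ++ ks.map (fun k => (k, W a (a.length - k.1.toNat) k.2)) := by
  intro ks
  induction ks with
  | nil => intro memo out _ _ _ _; simp
  | cons k rest ih =>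
    intro memo out hcoh hcast hfresh hnd
    obtain ⟨i, hi, hk1⟩ := hcast k (by simp)
    obtain ⟨k1, k2⟩ := k
    simp only [] at hk1
    subst hk1
    have hspec := lssB_spec a (a.length + 1) i k2 memo hi (by omega) hcoh
    have hv : (lssB a (a.length + 1) ((i:Int), k2) memo).1
        = W a (a.length - ((i:Int), k2).1.toNat) ((i:Int), k2).2 := by
      simpa [Int.toNat_natCast] using hspec.1
    have hcoh' : Coh a (lssB a (a.length + 1) ((i:Int), k2) memo).2 := hspec.2
    simp only [List.foldl_cons]
    rw [ih _ _ hcoh'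
      (fun k' hk' => hcast k' (by simp [hk']))
      (fun k' hk' => by
        rw [PySem.Dict.contains_insert]
        have hne : k' ≠ ((i:Int), k2) := by
          intro h; subst h; exact (List.nodup_cons.mp hnd).1 hk'
        simp [hne, hfresh k' (by simp [hk'])])
      (List.Nodup.of_cons hnd)]
    rw [PySem.Dict.items_insert_of_not_contains _ _ (hfresh ((i:Int), k2) (by simp)), hv]
    simp

-- the canonical items list both programs produce
def canonItems (a : List Int) : List ((Int × Int) × Int) :=
  (PySem.List.pyRange (-1) (a.length : Int) 1).map (fun j => (((a.length : Int), j), (0 : Int)))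
  ++ (PySem.List.pyRange ((a.length : Int) - 1) (-1) (-1)).flatMap (rowItems a)

theorem itemsA_eq (a : List Int) :
    ((PySem.List.pyRange ((a.length : Int) - 1) (-1) (-1)).foldl (stepAouter a)
        ((PySem.List.pyRange (-1) (a.length : Int) 1).foldl
            (fun T j => T.insert ((a.length : Int), j) (0 : Int)) PySem.Dict.empty)).items
      = canonItems a
    ∧ ((PySem.List.pyRange ((a.length : Int) - 1) (-1) (-1)).foldl (stepAouter a)
        ((PySem.List.pyRange (-1) (a.length : Int) 1).foldl
            (fun T j => T.insert ((a.length : Int), j) (0 : Int)) PySem.Dict.empty)).keys.Nodup := by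
  have hinj : Function.Injective (fun j : Int => ((a.length : Int), j)) := by
    intro x y h; simpa using h
  have hT0items :
      ((PySem.List.pyRange (-1) (a.length : Int) 1).foldl
          (fun T j => T.insert ((a.length : Int), j) (0 : Int)) PySem.Dict.empty).items
        = (PySem.List.pyRange (-1) (a.length : Int) 1).map
            (fun j => (((a.length : Int), j), (0 : Int))) := by
    have := PySem.Dict.items_foldl_insert_fresh (PySem.List.pyRange (-1) (a.length : Int) 1)
      (fun j : Int => ((a.length : Int), j)) (fun _ => (0 : Int)) PySem.Dict.empty
      (by intro j _; simp [PySem.Dict.contains_empty])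
      (List.Nodup.map hinj (PySem.List.nodup_pyRange_one _ _))
    simpa using this
  have hT0keys :
      ((PySem.List.pyRange (-1) (a.length : Int) 1).foldl
          (fun T j => T.insert ((a.length : Int), j) (0 : Int)) PySem.Dict.empty).keys.Nodup := by
    have := PySem.Dict.nodup_keys_foldl_insert_key (PySem.List.pyRange (-1) (a.length : Int) 1)
      (fun j : Int => ((a.length : Int), j)) (fun _ _ => (0 : Int)) PySem.Dict.empty
      (by simp)
    simpa using this
  have houter := outerA a a.length
    ((PySem.List.pyRange (-1) (a.length : Int) 1).foldl
        (fun T j => T.insert ((a.length : Int), j) (0 : Int)) PySem.Dict.empty)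
    ((PySem.List.pyRange (-1) (a.length : Int) 1).map
        (fun j => (((a.length : Int), j), (0 : Int))))
    (le_refl _) hT0keys
    (by
      intro p hp
      rw [hT0items] at hp
      simp only [List.mem_map] at hp
      obtain ⟨j, _, hj⟩ := hp
      rw [← hj])
    (by
      intro j hj1 hj2
      have hmem : (((a.length : Int), j), (0 : Int)) ∈
          ((PySem.List.pyRange (-1) (a.length : Int) 1).foldl
              (fun T j => T.insert ((a.length : Int), j) (0 : Int)) PySem.Dict.empty).items := by
        rw [hT0items]
        exact List.mem_map.mpr ⟨j, PySem.List.mem_pyRange_one.mpr ⟨by omega, hj2⟩, rfl⟩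
      rw [PySem.Dict.getD_of_mem_items _ hmem hT0keys 0, Nat.sub_self]
      rfl)
    hT0items
  exact ⟨houter.1, houter.2⟩

theorem keysB_eq (a : List Int) : keysB a = (canonItems a).map Prod.fst := by
  simp only [keysB, canonItems, rowItems, List.map_append, List.map_flatMap, List.map_map]
  rfl

theorem main_eq (a : List Int) : memoizeLSS a = memoizeLSS_alt a := by
  have hA := itemsA_eq a
  -- the canonical key list is duplicate-free (it is the key list of A's finished dict)
  have hnodup : (keysB a).Nodup := by
    rw [keysB_eq]
    have := hA.2
    simp only [PySem.Dict.keys, hA.1] at this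
    exact this
  -- every key's first component is a Nat ≤ n
  have hcastk : ∀ k ∈ keysB a, ∃ i : Nat, i ≤ a.length ∧ k.1 = (i : Int) := by
    intro k hk
    rcases List.mem_append.mp hk with h | h
    · simp only [List.mem_map] at h
      obtain ⟨j, _, hj⟩ := h
      exact ⟨a.length, le_refl _, by rw [← hj]⟩
    · simp only [List.mem_flatMap, List.mem_map] at h
      obtain ⟨i, hi, j, _, hj⟩ := h
      have hib := (PySem.List.mem_pyRange_neg_one).mp hi
      refine ⟨i.toNat, by omega, ?_⟩
      rw [← hj]
      simp only []
      omega
  -- B's fold writes exactly the canonical items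
  have hB := foldB a (keysB a) PySem.Dict.empty PySem.Dict.empty
    (by intro p hp; simp [PySem.Dict.empty] at hp)
    hcastk
    (by intro k _; simp [PySem.Dict.contains_empty])
    hnodup
  have hmapval : (keysB a).map (fun k => (k, W a (a.length - k.1.toNat) k.2)) = canonItems a := by
    simp only [keysB, canonItems, List.map_append, List.map_flatMap, List.map_map]
    congr 1
    refine List.map_congr_left (fun j _ => ?_)
    simp [W, Int.toNat_natCast, Function.comp]
  show ((PySem.List.pyRange ((a.length:Int) - 1) (-1) (-1)).foldl (stepAouter a)
      ((PySem.List.pyRange (-1) (a.length:Int) 1).foldl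
          (fun T j => T.insert ((a.length:Int), j) (0 : Int)) PySem.Dict.empty)).items.map
      (fun p => (p.1.1, p.1.2, p.2))
    = ((keysB a).foldl
        (fun st k =>
          let r := lssB a (a.length + 1) k st.2
          (st.1.insert k r.1, r.2))
        (PySem.Dict.empty, PySem.Dict.empty)).1.items.map (fun p => (p.1.1, p.1.2, p.2))
  rw [hA.1, hB, hmapval]
  rfl

-- ===== VERDICT (by name: the statement is the Claim_ definition above) =====
theorem memoizeLSS_spec : Claim_equal_memoizeLSS := by
  intro a _
  unfold Spec_memoizeLSS
  exact main_eq a
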